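-- pv_equiv track=rewrite | github.com/GabinFqt/escape-logs-analyzer | app/commands/summary.py | _generate_group_ids
-- ===== SOURCE A (Python) =====
-- def _generate_group_ids(endpoints: dict) -> dict[str, str]:
--     """Generate IDs for named groups (A, B, C, ..., Z, AA, AB, ...)."""
--     group_ids = {}
--     alphabet = 'ABCDEFGHIJKLMNOPQRSTUVWXYZ'
--
--     for current_id, name in enumerate(sorted(endpoints.keys())):
--         # Generate ID (A, B, C, ..., Z, AA, AB, ...)
--         id_str = ''
--         temp_id = current_id
--         while temp_id >= 0:
--             id_str = alphabet[temp_id % 26] + id_str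
--             temp_id = temp_id // 26 - 1
--         group_ids[name] = id_str
--
--     return group_ids
-- ===== SOURCE B (Python) =====
-- def _generate_group_ids(endpoints: dict) -> dict[str, str]:
--     """Generate IDs for named groups (A, B, C, ..., Z, AA, AB, ...)."""
--     group_ids = {}
--     digits = []  # label letters, least-significant first (odometer)
--     for name in sorted(endpoints.keys()):
--         digits = _inc(digits)
--         group_ids[name] = ''.join(reversed(digits))
--     return group_ids
--
--
-- def _inc(digits):
--     """Successor in the A..Z, AA.. sequence, least-significant digit first."""
--     if not digits:
--         return ['A']
--     if digits[0] == 'Z':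
--         return ['A'] + _inc(digits[1:])
--     return [chr(ord(digits[0]) + 1)] + digits[1:]
-- ===== Notes on version B (the rewrite author's own statement) =====
-- stated objective: alternative
-- what changed: Replaces the per-name base-26 division loop (recomputing each label from its integer index) with an incrementally maintained odometer label that is incremented with carry once per name.
import Mathlib
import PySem

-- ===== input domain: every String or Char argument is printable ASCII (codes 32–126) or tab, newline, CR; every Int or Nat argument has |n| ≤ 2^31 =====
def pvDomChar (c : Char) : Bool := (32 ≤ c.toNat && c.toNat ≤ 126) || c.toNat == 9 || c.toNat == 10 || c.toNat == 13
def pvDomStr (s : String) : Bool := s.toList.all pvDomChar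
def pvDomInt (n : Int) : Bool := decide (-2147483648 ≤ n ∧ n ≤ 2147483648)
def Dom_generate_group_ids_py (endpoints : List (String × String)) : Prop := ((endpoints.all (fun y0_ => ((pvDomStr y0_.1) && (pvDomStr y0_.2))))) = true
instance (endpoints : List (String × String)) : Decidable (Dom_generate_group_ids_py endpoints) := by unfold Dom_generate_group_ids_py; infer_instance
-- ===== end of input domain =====

-- B replaces A's per-name base-26 division loop by an incrementally carried odometer label
-- (objective: alternative decomposition, same cost up to the sort).

-- ===== PORT A =====
def pvAlphabet : List Char := "ABCDEFGHIJKLMNOPQRSTUVWXYZ".toList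

-- while temp_id >= 0: id_str = alphabet[temp_id % 26] + id_str; temp_id = temp_id // 26 - 1
-- (the index temp_id % 26 always lies in [0, 26), so the pyGetD default is never used)
def pvIdLoop (temp : Int) (idStr : List Char) : List Char :=
  if _h : 0 ≤ temp then
    pvIdLoop (PySem.Int.floordiv temp 26 - 1)
      (PySem.List.pyGetD pvAlphabet (PySem.Int.mod temp 26) 'A' :: idStr)
  else idStr
termination_by (temp + 1).toNat
decreasing_by
  rw [PySem.Int.floordiv_eq_ediv_of_pos (by omega : (0:Int) < 26)]
  omega

def generate_group_ids_py (endpoints : List (String × String)) : List (String × String) :=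
  let names := PySem.List.sorted ((PySem.Dict.ofList endpoints).keys) (fun x => x)
  ((PySem.List.enumerate names 0).foldl
    (fun (d : PySem.Dict String String) p => d.insert p.2 (String.ofList (pvIdLoop p.1 [])))
    PySem.Dict.empty).items

-- ===== PORT B =====
-- _inc: successor in the A..Z, AA.. sequence, least-significant digit first
def pvInc : List Char → List Char
  | [] => ['A']
  | c :: r => if c = 'Z' then 'A' :: pvInc r else Char.ofNat (c.toNat + 1) :: r

def generate_group_ids_py_alt (endpoints : List (String × String)) : List (String × String) :=
  let names := PySem.List.sorted ((PySem.Dict.ofList endpoints).keys) (fun x => x)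
  (names.foldl
    (fun (s : List Char × PySem.Dict String String) name =>
      let digits := pvInc s.1
      (digits, s.2.insert name (String.ofList digits.reverse)))
    ([], PySem.Dict.empty)).2.items

-- ===== PRECONDITION & SPEC =====
def Spec_generate_group_ids_py (endpoints : List (String × String)) (out : List (String × String)) : Prop := out = generate_group_ids_py_alt endpoints
instance (endpoints : List (String × String)) (out : List (String × String)) : Decidable (Spec_generate_group_ids_py endpoints out) := by unfold Spec_generate_group_ids_py; infer_instance

-- ===== CLAIM (what is proved, stated in full; the proofs are below) =====
def Claim_equal_generate_group_ids_py : Prop := ∀ (endpoints : List (String × String)), Dom_generate_group_ids_py endpoints → Spec_generate_group_ids_py endpoints (generate_group_ids_py endpoints)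

-- ===== LEMMAS AND PROOFS =====

-- the bijective base-26 label of index n, most-significant digit first
def pvL (n : Nat) : List Char :=
  if _h : n < 26 then [pvAlphabet.getD n 'A']
  else pvL (n / 26 - 1) ++ [pvAlphabet.getD (n % 26) 'A']
termination_by n
decreasing_by omega

theorem pvL_zero : pvL 0 = ['A'] := by rw [pvL]; rfl

theorem pvL_25 : pvL 25 = ['Z'] := by rw [pvL]; rfl

theorem pvL_26 : pvL 26 = ['A', 'A'] := by
  rw [pvL, dif_neg (by omega)]
  norm_num [pvL_zero]
  decide

theorem pvIdLoop_eq (n : Nat) : ∀ acc, pvIdLoop (n : Int) acc = pvL n ++ acc := by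
  induction n using Nat.strong_induction_on with
  | _ n ih =>
    intro acc
    rw [pvIdLoop, dif_pos (by positivity)]
    have hm : PySem.Int.mod (n : Int) 26 = ((n % 26 : Nat) : Int) := by
      rw [PySem.Int.mod_eq_emod_of_pos (by omega)]; omega
    rw [hm, PySem.List.pyGetD_natCast]
    conv_rhs => rw [pvL]
    by_cases h26 : n < 26
    · have hd : PySem.Int.floordiv (n : Int) 26 - 1 = -1 := by
        rw [PySem.Int.floordiv_eq_ediv_of_pos (by omega)]; omega
      rw [hd, pvIdLoop, dif_neg (by omega), dif_pos h26]
      have : n % 26 = n := Nat.mod_eq_of_lt h26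
      simp [this]
    · have hd : PySem.Int.floordiv (n : Int) 26 - 1 = ((n / 26 - 1 : Nat) : Int) := by
        rw [PySem.Int.floordiv_eq_ediv_of_pos (by omega)]; omega
      rw [hd, ih (n / 26 - 1) (by omega), dif_neg h26]
      simp [List.getD]

theorem pvInc_L (n : Nat) : pvInc (pvL n).reverse = (pvL (n + 1)).reverse := by
  induction n using Nat.strong_induction_on with
  | _ n ih =>
    by_cases hz : n % 26 = 25
    · -- carry: last digit is 'Z'
      by_cases h26 : n < 26
      · have : n = 25 := by omega
        subst this
        rw [pvL_25, pvL_26]; decide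
      · conv_rhs => rw [pvL, dif_neg (by omega : ¬ n + 1 < 26)]
        rw [pvL, dif_neg h26]
        have h2 : (n + 1) % 26 = 0 := by omega
        have h3 : (n + 1) / 26 - 1 = (n / 26 - 1) + 1 := by omega
        rw [hz, h2, h3]
        simp only [List.reverse_append, List.reverse_cons, List.reverse_nil, List.nil_append,
          List.cons_append]
        rw [pvInc]
        rw [if_pos (by decide : (pvAlphabet.getD 25 'A') = 'Z'), ih (n / 26 - 1) (by omega)]
        rfl
    · -- no carry: last digit below 'Z'
      have hlt : n % 26 < 25 := by omega
      have hsucc : ∀ k : Nat, k < 25 →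
          (¬ pvAlphabet.getD k 'A' = 'Z') ∧
            Char.ofNat ((pvAlphabet.getD k 'A').toNat + 1) = pvAlphabet.getD (k + 1) 'A' := by
        intro k hk; interval_cases k <;> exact ⟨by decide, by decide⟩
      by_cases h26 : n < 26
      · have hn : n % 26 = n := Nat.mod_eq_of_lt h26
        conv_rhs => rw [pvL, dif_pos (by omega : n + 1 < 26)]
        rw [pvL, dif_pos h26]
        simp only [List.reverse_cons, List.reverse_nil, List.nil_append]
        rw [pvInc, if_neg (hsucc n (by omega)).1, (hsucc n (by omega)).2]
      · conv_rhs => rw [pvL, dif_neg (by omega : ¬ n + 1 < 26)]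
        rw [pvL, dif_neg h26]
        have h2 : (n + 1) % 26 = n % 26 + 1 := by omega
        have h3 : (n + 1) / 26 - 1 = n / 26 - 1 := by omega
        rw [h2, h3]
        simp only [List.reverse_append, List.reverse_cons, List.reverse_nil, List.nil_append,
          List.cons_append]
        rw [pvInc, if_neg (hsucc _ hlt).1, (hsucc _ hlt).2]

theorem pv_fold_eq : ∀ (names : List String) (i : Nat) (lab : List Char)
    (d : PySem.Dict String String), pvInc lab = (pvL i).reverse →
    (PySem.List.enumerate names (i : Int)).foldl
      (fun (d : PySem.Dict String String) p => d.insert p.2 (String.ofList (pvIdLoop p.1 []))) d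
    = (names.foldl
        (fun (s : List Char × PySem.Dict String String) name =>
          let digits := pvInc s.1
          (digits, s.2.insert name (String.ofList digits.reverse))) (lab, d)).2 := by
  intro names
  induction names with
  | nil => intro i lab d _; rfl
  | cons x t iht =>
    intro i lab d h
    rw [PySem.List.enumerate_cons, List.foldl_cons, List.foldl_cons]
    simp only [pvIdLoop_eq i [], List.append_nil, h, List.reverse_reverse]
    have hc : (i : Int) + 1 = ((i + 1 : Nat) : Int) := by push_cast; ring
    rw [hc, iht (i + 1) (pvL i).reverse _ (pvInc_L i)]

-- ===== VERDICT (by name: the statement is the Claim_ definition above) =====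
theorem generate_group_ids_py_spec : Claim_equal_generate_group_ids_py := by
  intro endpoints _
  unfold Spec_generate_group_ids_py generate_group_ids_py generate_group_ids_py_alt
  exact congrArg PySem.Dict.items
    (pv_fold_eq (PySem.List.sorted ((PySem.Dict.ofList endpoints).keys) (fun x => x))
      0 [] PySem.Dict.empty (by rw [pvL_zero]; rfl))
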